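-- pv_equiv track=rewrite | github.com/PihtaHorse/garmantino | garmantino/apps/garmantino/additionalModules/pack_in_rows.py | make_row_by_position
-- ===== SOURCE A (Python) =====
-- def make_row_by_position(row_len, cells, positions, cell_counter):
--     row = []
--     for i in range(row_len):
--         if positions and cell_counter == positions[0]:
--             cell = cells.pop(0)
--             positions.pop(0)
--         else:
--             cell = None
--
--         cell_counter += 1
--         row.append(cell)
--
--     return row, cell_counter
-- ===== SOURCE B (Python) =====
-- # B: iterate the sparse positions with a watermark instead of scanning every slot.
-- def make_row_by_position(row_len, cells, positions, cell_counter):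
--     n = max(row_len, 0)
--     row = [None] * n
--     end = cell_counter + n
--     next_allowed = cell_counter
--     while positions and next_allowed <= positions[0] < end:
--         p = positions.pop(0)
--         row[p - cell_counter] = cells.pop(0)
--         next_allowed = p + 1
--     return row, end
-- ===== Notes on version B (the rewrite author's own statement) =====
-- stated objective: alternative
-- what changed: Instead of scanning all row_len slots with a per-slot match against positions[0], B preallocates the row and walks only the position list with a watermark guard, writing each cell directly at its offset.
import Mathlib
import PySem

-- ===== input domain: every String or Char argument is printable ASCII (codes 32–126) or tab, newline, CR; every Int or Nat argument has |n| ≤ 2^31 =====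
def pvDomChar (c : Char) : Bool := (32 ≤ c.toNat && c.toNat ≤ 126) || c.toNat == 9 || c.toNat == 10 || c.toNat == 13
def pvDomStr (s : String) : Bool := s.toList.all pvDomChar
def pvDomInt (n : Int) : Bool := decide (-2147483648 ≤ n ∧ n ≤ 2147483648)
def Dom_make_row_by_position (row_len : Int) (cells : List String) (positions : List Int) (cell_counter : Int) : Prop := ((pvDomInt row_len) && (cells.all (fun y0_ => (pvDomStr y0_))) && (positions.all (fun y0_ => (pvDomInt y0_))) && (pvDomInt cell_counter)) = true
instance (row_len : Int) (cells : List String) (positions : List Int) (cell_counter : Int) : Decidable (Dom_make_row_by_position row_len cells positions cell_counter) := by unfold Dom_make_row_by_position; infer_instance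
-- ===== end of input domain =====

-- B fills the row by walking the sparse position list with a watermark instead of scanning every
-- slot (objective: alternative decomposition). Equivalence is about the RETURN value; both versions
-- pop consumed entries from `cells`/`positions` in the same way. Pre_ excludes exactly the inputs
-- where Python A (and B) raise IndexError popping from an exhausted `cells`.

-- ===== PORT A =====
def pvAGo (k : Nat) (cells : List String) (positions : List Int) (cc : Int)
    (row : List (Option String)) : List (Option String) × Int :=
  match k with
  | 0 => (row.reverse, cc)
  | Nat.succ k =>
    match positions with
    | p :: ps =>
      if cc = p then
        match cells with
        | c :: cs => pvAGo k cs ps (cc + 1) (some c :: row)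
        | [] => pvAGo k [] ps (cc + 1) (none :: row)  -- Python raises IndexError here (outside Pre_)
      else pvAGo k cells positions (cc + 1) (none :: row)
    | [] => pvAGo k cells positions (cc + 1) (none :: row)

def make_row_by_position (row_len : Int) (cells : List String) (positions : List Int) (cell_counter : Int) : List (Option String) × Int :=
  pvAGo row_len.toNat cells positions cell_counter []

-- ===== PORT B =====
def pvBGo (positions : List Int) (cells : List String) (next_allowed cc0 endv : Int)
    (row : List (Option String)) : List (Option String) :=
  match positions with
  | [] => row
  | p :: ps =>
    if next_allowed ≤ p ∧ p < endv then
      match cells with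
      | c :: cs => pvBGo ps cs (p + 1) cc0 endv (row.set (p - cc0).toNat (some c))
      | [] => row  -- Python raises IndexError here (outside Pre_)
    else row

def make_row_by_position_alt (row_len : Int) (cells : List String) (positions : List Int) (cell_counter : Int) : List (Option String) × Int :=
  let n : Int := max row_len 0
  (pvBGo positions cells cell_counter cell_counter (cell_counter + n)
      (List.replicate n.toNat none), cell_counter + n)

-- ===== PRECONDITION & SPEC =====
-- Number of positions the row consumes: the longest prefix of `positions` that is strictly
-- increasing, starts at or after `lo`, and stays below `hi`.
def pvMatchedLen (positions : List Int) (lo hi : Int) : Nat :=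
  match positions with
  | [] => 0
  | p :: ps => if lo ≤ p ∧ p < hi then 1 + pvMatchedLen ps (p + 1) hi else 0

-- Pre_ excludes exactly the inputs on which Python A raises IndexError (fewer cells than
-- consumed positions); A returns on every input admitted here.
def Pre_make_row_by_position (row_len : Int) (cells : List String) (positions : List Int) (cell_counter : Int) : Prop :=
  pvMatchedLen positions cell_counter (cell_counter + max row_len 0) ≤ cells.length
instance (row_len : Int) (cells : List String) (positions : List Int) (cell_counter : Int) : Decidable (Pre_make_row_by_position row_len cells positions cell_counter) := by unfold Pre_make_row_by_position; infer_instance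

def pvWitness_make_row_by_position : Int × List String × List Int × Int := (3, ["a", "b"], [1, 2], 0)

def Spec_make_row_by_position (row_len : Int) (cells : List String) (positions : List Int) (cell_counter : Int) (out : List (Option String) × Int) : Prop := out = make_row_by_position_alt row_len cells positions cell_counter
instance (row_len : Int) (cells : List String) (positions : List Int) (cell_counter : Int) (out : List (Option String) × Int) : Decidable (Spec_make_row_by_position row_len cells positions cell_counter out) := by unfold Spec_make_row_by_position; infer_instance

-- ===== CLAIM (what is proved, stated in full; the proofs are below) =====
def Claim_equal_make_row_by_position : Prop := ∀ (row_len : Int) (cells : List String) (positions : List Int) (cell_counter : Int), Dom_make_row_by_position row_len cells positions cell_counter → Pre_make_row_by_position row_len cells positions cell_counter → Spec_make_row_by_position row_len cells positions cell_counter (make_row_by_position row_len cells positions cell_counter)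

-- ===== LEMMAS AND PROOFS =====

-- A's accumulator lemma
theorem pvAGo_acc (k : Nat) (cells : List String) (positions : List Int) (cc : Int)
    (row : List (Option String)) :
    pvAGo k cells positions cc row
      = (row.reverse ++ (pvAGo k cells positions cc []).1, cc + k) := by
  induction k generalizing cells positions cc row with
  | zero => simp [pvAGo]
  | succ k ih =>
    match positions with
    | [] =>
      simp only [pvAGo]
      rw [ih cells [] (cc+1) (none :: row), ih cells [] (cc+1) [none]]
      simp; omega
    | p :: ps =>
      by_cases h : cc = p
      · match cells with
        | [] =>
          simp only [pvAGo, if_pos h]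
          rw [ih [] ps (cc+1) (none :: row), ih [] ps (cc+1) [none]]
          simp; omega
        | c :: cs =>
          simp only [pvAGo, if_pos h]
          rw [ih cs ps (cc+1) (some c :: row), ih cs ps (cc+1) [some c]]
          simp; omega
      · simp only [pvAGo, if_neg h]
        rw [ih cells (p::ps) (cc+1) (none :: row), ih cells (p::ps) (cc+1) [none]]
        simp; omega

-- A on positions that can never match again yields an all-none row
theorem pvAGo_dead (k : Nat) (cells : List String) (positions : List Int) (cc : Int)
    (h : ∀ p ∈ positions.head?, p < cc ∨ cc + k ≤ p) :
    pvAGo k cells positions cc [] = (List.replicate k none, cc + k) := by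
  induction k generalizing cc with
  | zero => simp [pvAGo]
  | succ k ih =>
    match positions with
    | [] =>
      simp only [pvAGo]
      rw [pvAGo_acc, ih (cc+1) (by simp)]
      simp [List.replicate_succ]; omega
    | p :: ps =>
      have hp : p < cc ∨ cc + (k+1 : Nat) ≤ p := h p (by simp)
      have hne : ¬ cc = p := by omega
      simp only [pvAGo, if_neg hne]
      rw [pvAGo_acc, ih (cc+1) (by simp; omega)]
      simp [List.replicate_succ]; omega

-- B's first write is at index ≥ 1 when next_allowed > cc0: peel the head of the row
theorem pvBGo_shift (positions : List Int) (cells : List String) (na cc0 endv : Int)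
    (x : Option String) (row : List (Option String)) (h : cc0 + 1 ≤ na) :
    pvBGo positions cells na cc0 endv (x :: row)
      = x :: pvBGo positions cells na (cc0 + 1) endv row := by
  induction positions generalizing cells na row with
  | nil => simp [pvBGo]
  | cons p ps ih =>
    by_cases hg : na ≤ p ∧ p < endv
    · match cells with
      | [] => simp [pvBGo, hg]
      | c :: cs =>
        simp only [pvBGo, if_pos hg]
        have h1 : (p - cc0).toNat = (p - (cc0 + 1)).toNat + 1 := by omega
        rw [h1]
        simp only [List.set]
        exact ih cs (p+1) _ (by omega)
    · simp [pvBGo, hg]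

-- the watermark only matters through the test against the head position
theorem pvBGo_na (p : Int) (ps : List Int) (cells : List String) (na na' cc0 endv : Int)
    (row : List (Option String)) (h1 : na ≤ p) (h2 : na' ≤ p) :
    pvBGo (p :: ps) cells na cc0 endv row = pvBGo (p :: ps) cells na' cc0 endv row := by
  by_cases hg : p < endv
  · simp only [pvBGo, if_pos (And.intro h1 hg), if_pos (And.intro h2 hg)]
  · simp [pvBGo, hg]

theorem pvMatchedLen_shift (p : Int) (ps : List Int) (cc hi : Int) (h : ¬ cc = p) :
    pvMatchedLen (p :: ps) (cc + 1) hi = pvMatchedLen (p :: ps) cc hi := by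
  by_cases hg : cc ≤ p ∧ p < hi
  · have h2 : cc + 1 ≤ p ∧ p < hi := ⟨by omega, hg.2⟩
    simp only [pvMatchedLen, if_pos hg, if_pos h2]
  · have h2 : ¬ (cc + 1 ≤ p ∧ p < hi) := by omega
    simp only [pvMatchedLen, if_neg hg, if_neg h2]

-- main induction: A's slot-by-slot scan equals B's position walk
theorem pvMain (k : Nat) (positions : List Int) (cells : List String) (cc : Int)
    (hpre : pvMatchedLen positions cc (cc + k) ≤ cells.length) :
    pvAGo k cells positions cc []
      = (pvBGo positions cells cc cc (cc + k) (List.replicate k none), cc + k) := by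
  induction k generalizing positions cells cc with
  | zero =>
    match positions with
    | [] => simp [pvAGo, pvBGo]
    | p :: ps =>
      have : ¬ (cc ≤ p ∧ p < cc + (0:Nat)) := by omega
      simp [pvAGo, pvBGo, this]
  | succ k ih =>
    have e : cc + ((k + 1 : Nat) : Int) = (cc + 1) + (k : Int) := by push_cast; omega
    match positions with
    | [] =>
      simp only [pvAGo, pvBGo]
      rw [pvAGo_acc, ih [] cells (cc+1) (by simp [pvMatchedLen])]
      simp [pvBGo, List.replicate_succ]; omega
    | p :: ps =>
      by_cases h : cc = p
      · -- A consumes the first cell now; so does B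
        subst h
        have hg : cc ≤ cc ∧ cc < cc + ((k+1:Nat) : Int) := by push_cast; omega
        have hm : pvMatchedLen (cc :: ps) cc (cc + ((k+1:Nat):Int))
            = 1 + pvMatchedLen ps (cc + 1) (cc + ((k+1:Nat):Int)) := by
          simp [pvMatchedLen, hg]
        match cells with
        | [] => rw [hm] at hpre; simp at hpre
        | c :: cs =>
          rw [e] at hpre hg hm ⊢
          simp only [pvAGo, if_pos rfl]
          rw [pvAGo_acc, ih ps cs (cc+1) (by rw [hm] at hpre; simp at hpre; omega)]
          have hrep : (List.replicate (k+1) (none : Option String)).set (cc - cc).toNat (some c)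
              = some c :: List.replicate k none := by
            simp [List.replicate_succ]
          simp only [pvBGo, if_pos hg, hrep]
          rw [pvBGo_shift ps cs (cc+1) cc ((cc+1) + (k:Int)) (some c) _ (by omega)]
          simp
      · by_cases hg : cc ≤ p ∧ p < cc + ((k+1:Nat):Int)
        · -- head position is ahead but in range: B consumes it eagerly, A writes none now
          rw [e] at hpre hg ⊢
          simp only [pvAGo, if_neg h]
          rw [pvAGo_acc, ih (p::ps) cells (cc+1)
              (by rw [pvMatchedLen_shift p ps cc _ h]; exact hpre)]
          rw [List.replicate_succ]
          rw [pvBGo_na p ps cells cc (cc+1) cc ((cc+1) + (k:Int)) _ (by omega) (by omega)]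
          rw [pvBGo_shift (p::ps) cells (cc+1) cc ((cc+1) + (k:Int)) none _ (by omega)]
          simp
        · -- head position unreachable: A fills the row with none, B stops at once
          rw [pvAGo_dead (k+1) cells (p::ps) cc (by simp; omega)]
          simp only [pvBGo, if_neg hg]

theorem toNat_max (n : Int) : (max n 0).toNat = n.toNat := by omega

-- ===== VERDICT (by name: the statement is the Claim_ definition above) =====
theorem make_row_by_position_spec : Claim_equal_make_row_by_position := by
  intro rl cells pos cc _ hpre
  unfold Spec_make_row_by_position make_row_by_position make_row_by_position_alt
  have hmax : cc + max rl 0 = cc + (rl.toNat : Int) := by omega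
  show pvAGo rl.toNat cells pos cc []
      = (pvBGo pos cells cc cc (cc + max rl 0) (List.replicate (max rl 0).toNat none), cc + max rl 0)
  rw [toNat_max, pvMain rl.toNat pos cells cc (by unfold Pre_make_row_by_position at hpre; rw [hmax] at hpre; exact hpre), hmax]
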